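-- pv_equiv track=rewrite | github.com/crosswordnexus/variety-tools | jelly-roll/jellyroll.py | pairs_of_letters
-- ===== SOURCE A (Python) =====
-- def pairs_of_letters(word_orig):
--     # The "keys" of ret are the offset of the word
--     # we're interested in 0, 1, 2
--     ret = ['', '', '']
--     for offset in range(len(ret)):
--         remainder = ''
--         word = word_orig
--         addition, word = word[:2 - offset], word[2 - offset:]
--         remainder += addition
--         while word:
--             addition, word = word[2:4], word[4:]
--             remainder += addition
--         ret[offset] = remainder
--     return ret
-- ===== SOURCE B (Python) =====
-- def pairs_of_letters(word_orig):
--     out0, out1, out2 = [], [], []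
--     for i, c in enumerate(word_orig):
--         r = i % 4
--         if r == 0 or r == 1:
--             out0.append(c)
--         if r == 0 or r == 3:
--             out1.append(c)
--         if r == 2 or r == 3:
--             out2.append(c)
--     return [''.join(out0), ''.join(out1), ''.join(out2)]
-- ===== Notes on version B (the rewrite author's own statement) =====
-- stated objective: faster
-- what changed: Replaces A's three separate slice-and-concatenate scans (each repeatedly copying the remaining string via word[4:]) with a single enumerate pass that classifies each character by i%4 into three buckets joined at the end.
import Mathlib
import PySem

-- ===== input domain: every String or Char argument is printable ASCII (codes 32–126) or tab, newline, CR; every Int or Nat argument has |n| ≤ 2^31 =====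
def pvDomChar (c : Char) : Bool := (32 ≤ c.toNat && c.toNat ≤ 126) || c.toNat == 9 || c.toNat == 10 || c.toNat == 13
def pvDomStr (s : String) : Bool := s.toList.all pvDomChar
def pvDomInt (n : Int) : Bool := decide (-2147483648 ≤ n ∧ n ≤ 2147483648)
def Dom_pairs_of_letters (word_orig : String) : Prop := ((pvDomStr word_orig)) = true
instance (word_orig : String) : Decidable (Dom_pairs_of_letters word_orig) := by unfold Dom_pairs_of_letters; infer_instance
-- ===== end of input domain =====

-- B replaces A's three slice-walking scans (quadratic: word[4:] recopies the tail each step) with one linear enumerate pass classifying each char by i % 4.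

-- ===== PORT A =====
-- Python: while word: addition, word = word[2:4], word[4:]; remainder += addition
def aLoop (word : List Char) : List Char :=
  if h : word = [] then []
  else PySem.List.slice word (some 2) (some 4) ++ aLoop (PySem.List.slice word (some 4) none)
termination_by word.length
decreasing_by
  rw [show (4:Int) = ((4:Nat):Int) by norm_num, PySem.List.slice_from_natCast]
  cases word with
  | nil => exact absurd rfl h
  | cons a t => simp only [List.length_drop, List.length_cons]; omega

-- one iteration of A's 'for offset in range(3)' body: remainder for a given offset
def pairs_rem (cs : List Char) (offset : Int) : List Char :=
  let addition := PySem.List.slice cs none (some (2 - offset))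
  let word := PySem.List.slice cs (some (2 - offset)) none
  addition ++ aLoop word

def pairs_of_letters (word_orig : String) : List String :=
  (PySem.List.pyRange 0 3 1).map (fun offset => String.ofList (pairs_rem word_orig.toList offset))

-- ===== PORT B =====
def pairs_of_letters_alt (word_orig : String) : List String :=
  let res := (PySem.List.enumerate word_orig.toList 0).foldl
    (fun acc p =>
      let r := p.1 % 4
      ((if r == 0 || r == 1 then acc.1 ++ [p.2] else acc.1),
       (if r == 0 || r == 3 then acc.2.1 ++ [p.2] else acc.2.1),
       (if r == 2 || r == 3 then acc.2.2 ++ [p.2] else acc.2.2)))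
    ([], [], [])
  [String.ofList res.1, String.ofList res.2.1, String.ofList res.2.2]

-- ===== PRECONDITION & SPEC =====
def Spec_pairs_of_letters (word_orig : String) (out : List String) : Prop := out = pairs_of_letters_alt word_orig
instance (word_orig : String) (out : List String) : Decidable (Spec_pairs_of_letters word_orig out) := by unfold Spec_pairs_of_letters; infer_instance

-- ===== CLAIM (what is proved, stated in full; the proofs are below) =====
def Claim_equal_pairs_of_letters : Prop := ∀ (word_orig : String), Dom_pairs_of_letters word_orig → Spec_pairs_of_letters word_orig (pairs_of_letters word_orig)

-- ===== LEMMAS AND PROOFS =====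

-- chars of xs whose (start-offset) index satisfies p
def sel (p : Int → Bool) (xs : List Char) (s : Int) : List Char :=
  ((PySem.List.enumerate xs s).filter (fun q => p q.1)).map (·.2)

theorem sel_nil (p : Int → Bool) (s : Int) : sel p [] s = [] := by
  simp [sel, PySem.List.enumerate_nil]

theorem sel_cons (p : Int → Bool) (a : Char) (t : List Char) (s : Int) :
    sel p (a :: t) s = (if p s then [a] else []) ++ sel p t (s + 1) := by
  simp [sel, PySem.List.enumerate_cons, List.filter_cons]
  split <;> simp

theorem sel_congr (p q : Int → Bool) :
    ∀ (xs : List Char) (s t : Int), (∀ i : Nat, p (s + i) = q (t + i)) → sel p xs s = sel q xs t := by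
  intro xs
  induction xs with
  | nil => intro s t _; simp [sel_nil]
  | cons a u ih =>
    intro s t h
    rw [sel_cons, sel_cons]
    have h0 := h 0
    simp at h0
    rw [h0, ih (s + 1) (t + 1) (fun i => by
      have hh := h (i + 1)
      push_cast at hh
      rw [show s + 1 + (i : Int) = s + ((i : Int) + 1) by ring,
          show t + 1 + (i : Int) = t + ((i : Int) + 1) by ring]
      exact hh)]

theorem sel_take_drop (p : Int → Bool) (xs : List Char) (n : Nat) (s : Int) :
    sel p xs s = sel p (xs.take n) s ++ sel p (xs.drop n) (s + n) := by
  induction n generalizing xs s with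
  | zero => simp [sel_nil]
  | succ m ih =>
    cases xs with
    | nil => simp [sel_nil]
    | cons a t =>
      simp only [List.take_succ_cons, List.drop_succ_cons]
      rw [sel_cons, sel_cons, ih t (s + 1), List.append_assoc]
      congr 2
      push_cast; ring_nf

def q23 (i : Int) : Bool := i % 4 == 2 || i % 4 == 3

theorem aLoop_eq_aux : ∀ (n : Nat) (w : List Char), w.length ≤ n → aLoop w = sel q23 w 0 := by
  intro n
  induction n with
  | zero =>
    intro w hw
    have hnil : w = [] := by cases w <;> simp_all
    subst hnil
    rw [aLoop]
    simp [sel_nil]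
  | succ m ih =>
    intro w hw
    by_cases h : w = []
    · subst h; rw [aLoop]; simp [sel_nil]
    · rw [aLoop, dif_neg h,
          show (4:Int) = ((4:Nat):Int) by norm_num, PySem.List.slice_from_natCast,
          show (2:Int) = ((2:Nat):Int) by norm_num, PySem.List.slice_natCast,
          ih (w.drop 4) (by simp only [List.length_drop]; omega)]
      have hshift : ∀ t : List Char, sel q23 t 4 = sel q23 t 0 :=
        fun t => sel_congr _ _ t 4 0 (fun i => by simp [q23])
      match w with
      | [] => exact absurd rfl h
      | [a] => norm_num [sel_cons, sel_nil, q23]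
      | [a, b] => norm_num [sel_cons, sel_nil, q23]
      | [a, b, c] => norm_num [sel_cons, sel_nil, q23]
      | a :: b :: c :: d :: t => norm_num [sel_cons, sel_nil, q23, hshift t]

theorem aLoop_eq (w : List Char) : aLoop w = sel q23 w 0 :=
  aLoop_eq_aux w.length w le_rfl

def p01 (i : Int) : Bool := i % 4 == 0 || i % 4 == 1
def p03 (i : Int) : Bool := i % 4 == 0 || i % 4 == 3

theorem foldl3 (l : List (Int × Char)) (a b c : List Char) :
    l.foldl (fun acc p =>
      let r := p.1 % 4
      ((if r == 0 || r == 1 then acc.1 ++ [p.2] else acc.1),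
       (if r == 0 || r == 3 then acc.2.1 ++ [p.2] else acc.2.1),
       (if r == 2 || r == 3 then acc.2.2 ++ [p.2] else acc.2.2))) (a, b, c)
    = (a ++ (l.filter (fun q => p01 q.1)).map (·.2),
       b ++ (l.filter (fun q => p03 q.1)).map (·.2),
       c ++ (l.filter (fun q => q23 q.1)).map (·.2)) := by
  induction l generalizing a b c with
  | nil => simp
  | cons x t ih =>
    simp only [List.foldl_cons, List.filter_cons, ih, p01, p03, q23]
    split_ifs <;> simp_all [p01, p03, q23]

theorem rem0 (cs : List Char) : pairs_rem cs 0 = sel p01 cs 0 := by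
  simp only [pairs_rem]
  rw [show (2 - (0:Int)) = ((2:Nat):Int) by norm_num,
      PySem.List.slice_to_natCast, PySem.List.slice_from_natCast, aLoop_eq,
      sel_take_drop p01 cs 2 0]
  congr 1
  · match cs with
    | [] => simp [sel_nil]
    | [a] => simp [sel_cons, sel_nil, p01]
    | a :: b :: t => simp [sel_cons, sel_nil, p01]
  · apply sel_congr
    intro i
    rw [Bool.eq_iff_iff]
    simp [q23, p01]
    omega

theorem rem1 (cs : List Char) : pairs_rem cs 1 = sel p03 cs 0 := by
  simp only [pairs_rem]
  rw [show (2 - (1:Int)) = ((1:Nat):Int) by norm_num,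
      PySem.List.slice_to_natCast, PySem.List.slice_from_natCast, aLoop_eq,
      sel_take_drop p03 cs 1 0]
  congr 1
  · match cs with
    | [] => simp [sel_nil]
    | a :: t => simp [sel_cons, sel_nil, p03]
  · apply sel_congr
    intro i
    rw [Bool.eq_iff_iff]
    simp [q23, p03]
    omega

theorem rem2 (cs : List Char) : pairs_rem cs 2 = sel q23 cs 0 := by
  simp only [pairs_rem]
  rw [show (2 - (2:Int)) = ((0:Nat):Int) by norm_num,
      PySem.List.slice_to_natCast, PySem.List.slice_from_natCast, aLoop_eq]
  simp

-- ===== VERDICT (by name: the statement is the Claim_ definition above) =====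
theorem pairs_of_letters_spec : Claim_equal_pairs_of_letters := by
  intro w _
  unfold Spec_pairs_of_letters pairs_of_letters pairs_of_letters_alt
  rw [show PySem.List.pyRange 0 3 1 = [0, 1, 2] by decide]
  simp only [List.map_cons, List.map_nil, foldl3, List.nil_append]
  rw [rem0, rem1, rem2]
  rfl
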